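-- pv_equiv track=rewrite | github.com/SINF-KEN/BAPC_2023 | D/D.py | determine_county_name
-- ===== SOURCE A (Python) =====
-- def determine_county_name(n, m, city_names):
--     final_name = []
--     for i in range(m):
--         letter_count = {}
--         for name in city_names:
--             letter = name[i]
--             if letter in letter_count:
--                 letter_count[letter] += 1
--             else:
--                 letter_count[letter] = 1
--         max_count = max(letter_count.values())
--         best_letters = [letter for letter, count in letter_count.items() if count == max_count]
--         final_name.append(min(best_letters))
--     return ''.join(final_name)
-- ===== SOURCE B (Python) =====
-- def determine_county_name(n, m, city_names):
--     final_name = []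
--     for i in range(m):
--         col = sorted([name[i] for name in city_names])
--         best = col[0]
--         best_len = 0
--         cur = None
--         cur_len = 0
--         for c in col:
--             if c == cur:
--                 cur_len += 1
--             else:
--                 cur = c
--                 cur_len = 1
--             if cur_len > best_len:
--                 best = c
--                 best_len = cur_len
--         final_name.append(best)
--     return ''.join(final_name)
-- ===== Notes on version B (the rewrite author's own statement) =====
-- stated objective: alternative
-- what changed: Replaces the per-column dict counting plus max-over-values plus filter plus min with sorting each column and a single run-length scan of the sorted column that keeps the longest run seen (strict update breaks ties toward the smaller letter).
import Mathlib
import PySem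

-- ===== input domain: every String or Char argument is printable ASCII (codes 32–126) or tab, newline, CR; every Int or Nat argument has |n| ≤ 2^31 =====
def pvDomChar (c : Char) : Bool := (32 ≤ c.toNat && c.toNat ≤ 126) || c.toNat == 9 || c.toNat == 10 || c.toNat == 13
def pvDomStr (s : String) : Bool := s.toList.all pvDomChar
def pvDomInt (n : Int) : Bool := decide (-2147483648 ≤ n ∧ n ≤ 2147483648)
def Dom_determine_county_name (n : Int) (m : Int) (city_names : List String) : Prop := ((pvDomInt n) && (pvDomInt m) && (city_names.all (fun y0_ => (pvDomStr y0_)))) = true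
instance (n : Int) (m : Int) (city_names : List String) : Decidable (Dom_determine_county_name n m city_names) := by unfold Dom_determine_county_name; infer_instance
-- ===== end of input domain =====

-- B replaces the per-column dict count / max / filter / min of A by sorting each column and
-- doing one run-length scan of the sorted column (alternative decomposition, similar cost).


-- ===== PORT A =====
def determine_county_name (n : Int) (m : Int) (city_names : List String) : String :=
  let final_name : List Char := (PySem.List.pyRange 0 m).foldl (fun final_name i =>
    let letter_count := city_names.foldl (fun d name =>
      match PySem.Str.pyGet? name i with
      | some letter =>
          if d.contains letter then d.insert letter (d.getD letter 0 + 1)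
          else d.insert letter 1
      | none => d  -- name[i] raises IndexError: unreachable under Pre_
      ) (PySem.Dict.empty : PySem.Dict Char Int)
    match PySem.List.max? letter_count.values (fun v => v) with
    | none => final_name  -- max() of an empty dict raises ValueError: unreachable under Pre_
    | some max_count =>
      let best_letters := letter_count.items.foldl
        (fun acc p => if p.2 == max_count then acc ++ [p.1] else acc) []
      match PySem.List.min? best_letters (fun c => c) with
      | none => final_name  -- min() of [] raises ValueError: unreachable under Pre_
      | some c => final_name ++ [c]) []
  String.ofList final_name

-- ===== PORT B =====
-- one step of B's run-length scan over the sorted column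
def pvScanStep (s : Char × Int × Option Char × Int) (c : Char) : Char × Int × Option Char × Int :=
  match s with
  | (best, best_len, cur, cur_len) =>
    let p : Option Char × Int := if some c = cur then (cur, cur_len + 1) else (some c, 1)
    if p.2 > best_len then (c, p.2, p.1, p.2) else (best, best_len, p.1, p.2)

def determine_county_name_alt (n : Int) (m : Int) (city_names : List String) : String :=
  String.ofList ((PySem.List.pyRange 0 m).foldl (fun final_name i =>
    let col := PySem.List.sorted (city_names.foldl (fun acc name =>
        match PySem.Str.pyGet? name i with
        | some c => acc ++ [c]
        | none => acc  -- name[i] raises IndexError: unreachable under Pre_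
        ) []) (fun c => c)
    match col with
    | [] => final_name  -- col[0] raises IndexError: unreachable under Pre_
    | c0 :: _ =>
      let st := col.foldl pvScanStep (c0, 0, none, 0)
      final_name ++ [st.1]) [])

-- ===== PRECONDITION & SPEC =====
-- Pre_ excludes exactly the inputs where Python A raises: m > 0 with an empty city list
-- (ValueError from max() on an empty dict) or with some name shorter than m (IndexError).
def Pre_determine_county_name (n : Int) (m : Int) (city_names : List String) : Prop :=
  0 < m → (city_names ≠ [] ∧ ∀ s ∈ city_names, m ≤ PySem.Str.len s)
instance (n : Int) (m : Int) (city_names : List String) : Decidable (Pre_determine_county_name n m city_names) := by unfold Pre_determine_county_name; infer_instance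

def pvWitness_determine_county_name : Int × Int × List String := (3, 2, ["ab", "cb", "cd"])

def Spec_determine_county_name (n : Int) (m : Int) (city_names : List String) (out : String) : Prop := out = determine_county_name_alt n m city_names
instance (n : Int) (m : Int) (city_names : List String) (out : String) : Decidable (Spec_determine_county_name n m city_names out) := by unfold Spec_determine_county_name; infer_instance

-- ===== CLAIM (what is proved, stated in full; the proofs are below) =====
def Claim_equal_determine_county_name : Prop := ∀ (n : Int) (m : Int) (city_names : List String), Dom_determine_county_name n m city_names → Pre_determine_county_name n m city_names → Spec_determine_county_name n m city_names (determine_county_name n m city_names)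

-- ===== LEMMAS AND PROOFS =====

theorem pvContains_false_getD (d : PySem.Dict Char Int) (c : Char) (h : d.contains c = false) :
    d.getD c 0 = 0 := by
  have h2 : d.get? c = none := by
    have := PySem.Dict.contains_eq_isSome_get? d c
    rw [h] at this; cases hg : d.get? c <;> simp [hg] at this ⊢
  simp [PySem.Dict.getD, h2]

-- the column at index i: the characters name[i], skipping names that are too short
def pvCol (i : Int) (names : List String) : List Char :=
  names.filterMap (fun nm => PySem.Str.pyGet? nm i)

-- the value both programs compute per column: the minimal letter of maximal multiplicity
def pvP (col : List Char) (r : Char) : Prop :=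
  r ∈ col ∧ (∀ c ∈ col, col.count c ≤ col.count r) ∧ (∀ c ∈ col, col.count c = col.count r → r ≤ c)

theorem pvP_unique (col : List Char) (a b : Char) (ha : pvP col a) (hb : pvP col b) : a = b := by
  obtain ⟨hma, hca, hla⟩ := ha
  obtain ⟨hmb, hcb, hlb⟩ := hb
  have h1 : col.count a = col.count b := le_antisymm (hcb a hma) (hca b hmb)
  exact le_antisymm (hla b hmb h1.symm) (hlb a hma h1)

theorem pvP_perm (l l' : List Char) (h : l.Perm l') (r : Char) (hr : pvP l r) : pvP l' r := by
  obtain ⟨hm, hc, hl⟩ := hr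
  refine ⟨h.mem_iff.mp hm, ?_, ?_⟩
  · intro c hcmem
    rw [← h.count_eq, ← h.count_eq]
    exact hc c (h.mem_iff.mpr hcmem)
  · intro c hcmem he
    exact hl c (h.mem_iff.mpr hcmem) (by rw [h.count_eq, h.count_eq]; exact he)

theorem pvA_dict_gen (i : Int) (names : List String) : ∀ (d : PySem.Dict Char Int),
    names.foldl (fun d name =>
      match PySem.Str.pyGet? name i with
      | some letter =>
          if d.contains letter then d.insert letter (d.getD letter 0 + 1)
          else d.insert letter 1
      | none => d) d
    = (pvCol i names).foldl (fun d x => d.insert x (d.getD x 0 + 1)) d := by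
  induction names with
  | nil => intro d; simp [pvCol]
  | cons nm rest ih =>
    intro d
    simp only [List.foldl_cons, pvCol, List.filterMap_cons]
    cases h : PySem.Str.pyGet? nm i with
    | none => simpa [pvCol, h] using ih _
    | some c =>
      have hb : (if d.contains c then d.insert c (d.getD c 0 + 1) else d.insert c 1)
          = d.insert c (d.getD c 0 + 1) := by
        by_cases hc : d.contains c
        · simp [hc]
        · simp [hc, pvContains_false_getD d c (by simpa using hc)]
      simpa [pvCol, h, hb] using ih (d.insert c (d.getD c 0 + 1))

theorem pvA_col_spec (col : List Char) (hne : col ≠ []) :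
    ∃ mx r, PySem.List.max? (PySem.Dict.counter col).values (fun v => v) = some mx ∧
      PySem.List.min? ((PySem.Dict.counter col).items.foldl
        (fun acc p => if p.2 == mx then acc ++ [p.1] else acc) []) (fun c => c) = some r ∧
      pvP col r := by
  have hvalues : (PySem.Dict.counter col).values
      = (PySem.Set.ofList col).map (fun k => ((List.count k col : Int))) := by
    simp only [PySem.Dict.values, PySem.Dict.items_counter, List.map_map]
    rfl
  obtain ⟨c1, t1, rfl⟩ := List.exists_cons_of_ne_nil hne
  have hc1 : c1 ∈ PySem.Set.ofList (c1 :: t1) := (PySem.Set.mem_ofList _ _).mpr (by simp)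
  have hofne : PySem.Set.ofList (c1 :: t1) ≠ [] := List.ne_nil_of_mem hc1
  have hvne : (PySem.Dict.counter (c1 :: t1)).values ≠ [] := by
    rw [hvalues]; simpa using hofne
  cases hmx : PySem.List.max? (PySem.Dict.counter (c1 :: t1)).values (fun v => v) with
  | none => exact absurd ((PySem.List.max?_eq_none_iff _ _).mp hmx) hvne
  | some mx =>
  have hmxmem := PySem.List.max?_mem hmx
  rw [hvalues] at hmxmem
  obtain ⟨k0, hk0, hk0e⟩ := List.mem_map.mp hmxmem
  have hmax : ∀ c ∈ (c1 :: t1), ((c1 :: t1).count c : Int) ≤ mx := by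
    intro c hc
    have hcv : (((c1 :: t1).count c : Int)) ∈ (PySem.Dict.counter (c1 :: t1)).values := by
      rw [hvalues]
      exact List.mem_map.mpr ⟨c, (PySem.Set.mem_ofList _ _).mpr hc, rfl⟩
    exact PySem.List.max?_isMax hmx _ hcv
  have hbest : (PySem.Dict.counter (c1 :: t1)).items.foldl
      (fun acc p => if p.2 == mx then acc ++ [p.1] else acc) []
      = (PySem.Set.ofList (c1 :: t1)).filter (fun k => (((c1 :: t1).count k : Int)) == mx) := by
    rw [PySem.List.foldl_append_if (fun (p : Char × Int) => p.2 == mx) (fun (p : Char × Int) => p.1) (PySem.Dict.counter (c1 :: t1)).items []]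
    simp only [PySem.Dict.items_counter, List.filter_map, List.map_map, List.nil_append]
    simp [Function.comp_def]
  have hmem_best : ∀ x, x ∈ (PySem.Set.ofList (c1 :: t1)).filter
      (fun k => (((c1 :: t1).count k : Int)) == mx)
      ↔ x ∈ (c1 :: t1) ∧ (((c1 :: t1).count x : Int)) = mx := by
    intro x
    simp [List.mem_filter, PySem.Set.mem_ofList]
  have hk0b : k0 ∈ (PySem.Set.ofList (c1 :: t1)).filter
      (fun k => (((c1 :: t1).count k : Int)) == mx) :=
    (hmem_best k0).mpr ⟨(PySem.Set.mem_ofList _ _).mp hk0, hk0e⟩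
  cases hmn : PySem.List.min? ((PySem.Dict.counter (c1 :: t1)).items.foldl
      (fun acc p => if p.2 == mx then acc ++ [p.1] else acc) []) (fun c => c) with
  | none =>
    rw [hbest] at hmn
    exact absurd ((PySem.List.min?_eq_none_iff _ _).mp hmn) (List.ne_nil_of_mem hk0b)
  | some r =>
  refine ⟨mx, r, rfl, hmn, ?_, ?_, ?_⟩
  · rw [hbest] at hmn
    exact ((hmem_best r).mp (PySem.List.min?_mem hmn)).1
  · intro c hc
    have hr : (((c1 :: t1).count r : Int)) = mx := by
      rw [hbest] at hmn
      exact ((hmem_best r).mp (PySem.List.min?_mem hmn)).2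
    have := hmax c hc
    rw [← hr] at this
    exact_mod_cast this
  · intro c hc he
    have hr : (((c1 :: t1).count r : Int)) = mx := by
      rw [hbest] at hmn
      exact ((hmem_best r).mp (PySem.List.min?_mem hmn)).2
    have hcb : c ∈ (PySem.Set.ofList (c1 :: t1)).filter
        (fun k => (((c1 :: t1).count k : Int)) == mx) :=
      (hmem_best c).mpr ⟨hc, by rw [he]; exact hr⟩
    rw [hbest] at hmn
    exact PySem.List.min?_isMin hmn c hcb

theorem pvScan_go (rest : List Char) : ∀ (p : List Char) (best : Char) (blen : Int) (lastc : Char) (clen : Int),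
    p ≠ [] → lastc ∈ p → (∀ x ∈ p, x ≤ lastc) →
    clen = (p.count lastc : Int) →
    best ∈ p → (p.count best : Int) = blen → (∀ x ∈ p, (p.count x : Int) ≤ blen) →
    (∀ x ∈ p, p.count x = p.count best → best ≤ x) →
    (∀ x ∈ p, ∀ y ∈ rest, x ≤ y) → rest.Pairwise (· ≤ ·) →
    pvP (p ++ rest) (rest.foldl pvScanStep (best, blen, some lastc, clen)).1 := by
  induction rest with
  | nil =>
    intro p best blen lastc clen hp hl hle hclen hbm hbc hub hmin hord hpw
    simp only [List.foldl_nil, List.append_nil]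
    refine ⟨hbm, ?_, hmin⟩
    intro x hx
    have h1 := hub x hx
    rw [← hbc] at h1
    exact_mod_cast h1
  | cons c rest' ih =>
    intro p best blen lastc clen hp hl hle hclen hbm hbc hub hmin hord hpw
    obtain ⟨hcle, hpw'⟩ := List.pairwise_cons.mp hpw
    have hcge : lastc ≤ c := hord lastc hl c (by simp)
    have hgoal : p ++ c :: rest' = (p ++ [c]) ++ rest' := by simp
    rw [List.foldl_cons, hgoal]
    have hcnt : ∀ x : Char, (p ++ [c]).count x = p.count x + (if x = c then 1 else 0) := by
      intro x
      by_cases hxc : x = c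
      · simp [List.count_append, List.count_singleton', hxc]
      · simp [List.count_append, List.count_singleton', hxc, Ne.symm hxc]
    have hmem : ∀ x : Char, x ∈ p ++ [c] ↔ x ∈ p ∨ x = c := by intro x; simp
    by_cases hc : c = lastc
    · subst hc
      have hstep : pvScanStep (best, blen, some c, clen) c
          = if clen + 1 > blen then (c, clen + 1, some c, clen + 1)
            else (best, blen, some c, clen + 1) := by
        simp [pvScanStep]
      rw [hstep]
      by_cases hgt : clen + 1 > blen
      · rw [if_pos hgt]
        apply ih (p ++ [c]) c (clen + 1) c (clen + 1)
        · simp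
        · exact (hmem c).mpr (Or.inr rfl)
        · intro x hx
          rcases (hmem x).mp hx with hx' | hx'
          · exact hle x hx'
          · exact le_of_eq hx'
        · rw [hcnt]; simp; push_cast; omega
        · exact (hmem c).mpr (Or.inr rfl)
        · rw [hcnt]; simp; push_cast; omega
        · intro x hx
          by_cases hxc : x = c
          · subst hxc; rw [hcnt]; simp; push_cast; omega
          · rcases (hmem x).mp hx with hx' | hx'
            · have := hub x hx'
              rw [hcnt]; simp [hxc]; push_cast; omega
            · exact absurd hx' hxc
        · intro x hx hxeq
          by_cases hxc : x = c
          · exact le_of_eq hxc.symm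
          · rcases (hmem x).mp hx with hx' | hx'
            · exfalso
              have h1 := hub x hx'
              rw [hcnt x, hcnt c] at hxeq
              simp [hxc] at hxeq
              have h2 : (p.count x : Int) = (p.count c : Int) + 1 := by exact_mod_cast hxeq
              omega
            · exact absurd hx' hxc
        · intro x hx y hy
          rcases (hmem x).mp hx with hx' | hx'
          · exact hord x hx' y (List.mem_cons_of_mem _ hy)
          · exact hx' ▸ hcle y hy
        · exact hpw'
      · rw [if_neg hgt]
        have hbne : best ≠ c := by
          intro h
          rw [h] at hbc
          omega
        apply ih (p ++ [c]) best blen c (clen + 1)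
        · simp
        · exact (hmem c).mpr (Or.inr rfl)
        · intro x hx
          rcases (hmem x).mp hx with hx' | hx'
          · exact hle x hx'
          · exact le_of_eq hx'
        · rw [hcnt]; simp; push_cast; omega
        · exact (hmem best).mpr (Or.inl hbm)
        · rw [hcnt]; simp [hbne]; exact hbc
        · intro x hx
          by_cases hxc : x = c
          · subst hxc; rw [hcnt]; simp; push_cast; omega
          · rcases (hmem x).mp hx with hx' | hx'
            · have := hub x hx'
              rw [hcnt]; simp [hxc]; omega
            · exact absurd hx' hxc
        · intro x hx hxeq
          by_cases hxc : x = c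
          · exact hxc ▸ hle best hbm
          · rcases (hmem x).mp hx with hx' | hx'
            · apply hmin x hx'
              rw [hcnt x, hcnt best] at hxeq
              simpa [hxc, hbne] using hxeq
            · exact absurd hx' hxc
        · intro x hx y hy
          rcases (hmem x).mp hx with hx' | hx'
          · exact hord x hx' y (List.mem_cons_of_mem _ hy)
          · exact hx' ▸ hcle y hy
        · exact hpw'
    · have hlt : lastc < c := lt_of_le_of_ne hcge (fun h => hc h.symm)
      have hcnotp : c ∉ p := fun hmemc => absurd (hle c hmemc) (not_le.mpr hlt)
      have hc0 : p.count c = 0 := List.count_eq_zero.mpr hcnotp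
      have hbpos : (1 : Int) ≤ blen := by
        have h1 : 0 < p.count best := List.count_pos_iff.mpr hbm
        have h2 : (1 : Int) ≤ (p.count best : Int) := by exact_mod_cast h1
        omega
      have hstep : pvScanStep (best, blen, some lastc, clen) c
          = (best, blen, some c, 1) := by
        have hne : ¬ (some c = some lastc) := by simp [hc]
        simp only [pvScanStep, hne, if_false, gt_iff_lt]
        rw [if_neg (by omega)]
      rw [hstep]
      apply ih (p ++ [c]) best blen c 1
      · simp
      · exact (hmem c).mpr (Or.inr rfl)
      · intro x hx
        rcases (hmem x).mp hx with hx' | hx'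
        · exact le_of_lt (lt_of_le_of_lt (hle x hx') hlt)
        · exact le_of_eq hx'
      · rw [hcnt]; simp [hc0]
      · exact (hmem best).mpr (Or.inl hbm)
      · have hbne : best ≠ c := fun h => hcnotp (h ▸ hbm)
        rw [hcnt]; simp [hbne]; exact hbc
      · intro x hx
        by_cases hxc : x = c
        · subst hxc; rw [hcnt]; simp [hc0]; omega
        · rcases (hmem x).mp hx with hx' | hx'
          · have := hub x hx'
            rw [hcnt]; simp [hxc]; omega
          · exact absurd hx' hxc
      · intro x hx hxeq
        by_cases hxc : x = c
        · exact hxc ▸ le_of_lt (lt_of_le_of_lt (hle best hbm) hlt)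
        · rcases (hmem x).mp hx with hx' | hx'
          · apply hmin x hx'
            have hbne : best ≠ c := fun h => hcnotp (h ▸ hbm)
            rw [hcnt x, hcnt best] at hxeq
            simpa [hxc, hbne] using hxeq
          · exact absurd hx' hxc
      · intro x hx y hy
        rcases (hmem x).mp hx with hx' | hx'
        · exact hord x hx' y (List.mem_cons_of_mem _ hy)
        · exact hx' ▸ hcle y hy
      · exact hpw'


theorem pvB_col_spec (colraw : List Char) (c0 : Char) (t : List Char)
    (hs : PySem.List.sorted colraw (fun c => c) = c0 :: t) :
    pvP colraw (((PySem.List.sorted colraw (fun c => c)).foldl pvScanStep (c0, 0, none, 0)).1) := by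
  have hpw : (PySem.List.sorted colraw (fun c => c)).Pairwise (fun a b => a ≤ b) :=
    PySem.List.sorted_pairwise colraw (fun c => c)
  rw [hs] at hpw ⊢
  obtain ⟨hcle, hpw'⟩ := List.pairwise_cons.mp hpw
  have hstep1 : pvScanStep (c0, 0, none, 0) c0 = (c0, 1, some c0, 1) := by
    simp [pvScanStep]
  rw [List.foldl_cons, hstep1]
  have hperm : (c0 :: t).Perm colraw := by
    rw [← hs]; exact PySem.List.sorted_perm colraw (fun c => c) false
  refine pvP_perm _ _ hperm _ ?_
  have hmain := pvScan_go t [c0] c0 1 c0 1 (by simp) (by simp) (by simp) (by simp)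
    (by simp) (by simp) (by simp) (by simp)
    (fun x hx y hy => by
      have : x = c0 := by simpa using hx
      exact this ▸ hcle y hy) hpw'
  simpa using hmain

theorem pvColFold (i : Int) (names : List String) : ∀ (acc : List Char),
    names.foldl (fun acc name =>
      match PySem.Str.pyGet? name i with
      | some c => acc ++ [c]
      | none => acc) acc = acc ++ pvCol i names := by
  induction names with
  | nil => intro acc; simp [pvCol]
  | cons nm rest ih =>
    intro acc
    simp only [List.foldl_cons, pvCol, List.filterMap_cons]
    cases h : PySem.Str.pyGet? nm i with
    | none => simpa [pvCol, h] using ih acc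
    | some c => simpa [pvCol, h] using ih (acc ++ [c])

-- ===== VERDICT (by name: the statement is the Claim_ definition above) =====
theorem determine_county_name_spec : Claim_equal_determine_county_name := by
  intro n m names hdom hpre
  unfold Spec_determine_county_name determine_county_name determine_county_name_alt
  dsimp only
  refine congrArg String.ofList (PySem.List.foldl_congr_mem _ _ _ [] ?_)
  intro acc i hi
  obtain ⟨hi0, him⟩ := PySem.List.mem_pyRange_one.mp hi
  obtain ⟨hne, hlen⟩ := hpre (lt_of_le_of_lt hi0 him)
  obtain ⟨nm0, rest, hnames⟩ := List.exists_cons_of_ne_nil hne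
  have hmem0 : nm0 ∈ names := by rw [hnames]; exact List.mem_cons_self
  have hlen0 : m ≤ (nm0.toList.length : Int) := by
    have := hlen nm0 hmem0
    simpa using this
  obtain ⟨ch, hget⟩ : ∃ ch, PySem.Str.pyGet? nm0 i = some ch := by
    refine ⟨nm0.toList[i.toNat]'(by omega), ?_⟩
    simp only [PySem.Str.pyGet?_eq, PySem.Chars.pyGet?_eq_listPyGet?]
    exact PySem.List.pyGet?_eq_some_getElem _ hi0 (by omega)
  have hget' : PySem.List.pyGet? nm0.toList i = some ch := by
    simpa using hget
  have hcol_ne : pvCol i names ≠ [] := by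
    rw [hnames]
    simp [pvCol, List.filterMap_cons, hget']
  obtain ⟨mx, r, hmx, hmn, hPr⟩ := pvA_col_spec (pvCol i names) hcol_ne
  rw [pvA_dict_gen i names, PySem.Dict.foldl_insert_getD_add_one_eq_counter, hmx]
  dsimp only
  rw [hmn]
  rw [pvColFold i names [], List.nil_append]
  cases hsorted : PySem.List.sorted (pvCol i names) (fun c => c) with
  | nil => exact absurd ((PySem.List.sorted_eq_nil_iff _ _ _).mp hsorted) hcol_ne
  | cons c0 t =>
    have hPb := pvB_col_spec (pvCol i names) c0 t hsorted
    rw [hsorted] at hPb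
    dsimp only
    rw [pvP_unique _ r _ hPr hPb]
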